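-- pv_equiv track=rewrite | github.com/riyatiwarii/LeetcodePractice | Strings(EASY)/String32.py | countConsistentStrings
-- ===== SOURCE A (Python) =====
-- def countConsistentStrings(allowed, words):
--     count = 0
--     for word in words:
--         for char in word:
--             if char not in allowed:
--                 count += 1
--                 break
--     return len(words) - count
-- ===== SOURCE B (Python) =====
-- def countConsistentStrings(allowed, words):
--     mask = 0
--     for c in allowed:
--         mask |= 1 << ord(c)
--     total = 0
--     for word in words:
--         wm = 0
--         for ch in word:
--             wm |= 1 << ord(ch)
--         if wm | mask == mask:
--             total += 1
--     return total
-- ===== Notes on version B (the rewrite author's own statement) =====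
-- stated objective: alternative
-- what changed: Replaces per-character membership scanning with an integer-bitset algorithm: allowed and each word are encoded as bitmasks (OR of 1<<ord(c)) and a word is counted consistent when its mask ORs into the allowed mask unchanged; the consistent words are counted directly instead of counting inconsistent ones and subtracting.
import Mathlib
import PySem

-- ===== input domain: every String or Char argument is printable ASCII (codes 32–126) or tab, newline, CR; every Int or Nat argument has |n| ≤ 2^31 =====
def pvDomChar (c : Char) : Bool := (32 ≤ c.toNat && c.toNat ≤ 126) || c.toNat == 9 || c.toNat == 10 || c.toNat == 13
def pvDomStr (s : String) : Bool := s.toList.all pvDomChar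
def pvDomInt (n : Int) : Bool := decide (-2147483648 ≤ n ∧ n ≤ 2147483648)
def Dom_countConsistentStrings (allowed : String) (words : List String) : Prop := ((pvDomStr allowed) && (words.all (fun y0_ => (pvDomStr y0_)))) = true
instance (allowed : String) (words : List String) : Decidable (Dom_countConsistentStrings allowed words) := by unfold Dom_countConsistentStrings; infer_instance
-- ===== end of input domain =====

-- B replaces A's per-character membership scan (early break, count inconsistent, subtract)
-- with an integer-bitset algorithm: allowed and each word become bitmasks and a word is
-- counted consistent when its mask ORs into the allowed mask unchanged. Same results.

-- ===== PORT A =====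
-- inner 'for char in word: if char not in allowed: count += 1; break'
def pvAWordLoop (allowed : List Char) : List Char → Int → Int
  | [], count => count
  | c :: rest, count =>
      if !(allowed.contains c) then count + 1 else pvAWordLoop allowed rest count

def countConsistentStrings (allowed : String) (words : List String) : Int :=
  let count := words.foldl (fun acc w => pvAWordLoop allowed.toList w.toList acc) 0
  (words.length : Int) - count

-- ===== PORT B =====
-- 'mask |= 1 << ord(c)' over a string; mask values are nonnegative, kept as Nat
def pvMaskOf (cs : List Char) : Nat :=
  cs.foldl (fun m c => m ||| (1 <<< c.toNat)) 0

def countConsistentStrings_alt (allowed : String) (words : List String) : Int :=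
  let mask := pvMaskOf allowed.toList
  words.foldl
    (fun total w =>
      if pvMaskOf w.toList ||| mask == mask then total + 1 else total) 0

-- ===== PRECONDITION & SPEC =====
def Spec_countConsistentStrings (allowed : String) (words : List String) (out : Int) : Prop := out = countConsistentStrings_alt allowed words
instance (allowed : String) (words : List String) (out : Int) : Decidable (Spec_countConsistentStrings allowed words out) := by unfold Spec_countConsistentStrings; infer_instance

-- ===== CLAIM (what is proved, stated in full; the proofs are below) =====
def Claim_equal_countConsistentStrings : Prop := ∀ (allowed : String) (words : List String), Dom_countConsistentStrings allowed words → Spec_countConsistentStrings allowed words (countConsistentStrings allowed words)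

-- ===== LEMMAS AND PROOFS =====

-- bit k of a word's mask is set iff some char of the word has code k
theorem pvMaskOf_testBit (cs : List Char) (k : Nat) :
    (pvMaskOf cs).testBit k = cs.any (fun c => c.toNat == k) := by
  suffices h : ∀ m : Nat, (cs.foldl (fun m c => m ||| (1 <<< c.toNat)) m).testBit k
      = (m.testBit k || cs.any (fun c => c.toNat == k)) by
    simpa [pvMaskOf] using h 0
  induction cs with
  | nil => simp
  | cons c rest ih =>
      intro m
      rw [List.foldl_cons, ih]
      simp [Nat.testBit_or, Nat.shiftLeft_eq, one_mul, Nat.testBit_two_pow]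
      by_cases h : c.toNat = k
      · simp [h]
      · have hf : (c.toNat == k) = false := by simpa using h
        simp [hf, h]

-- the bitmask subset test equals the all-chars-allowed test
theorem pvMask_subset_eq (allowed cs : List Char) :
    (pvMaskOf cs ||| pvMaskOf allowed == pvMaskOf allowed)
      = cs.all (fun c => allowed.contains c) := by
  rw [Bool.eq_iff_iff, beq_iff_eq, List.all_eq_true]
  constructor
  · intro h c hc
    have hb : (pvMaskOf cs).testBit c.toNat = true := by
      rw [pvMaskOf_testBit, List.any_eq_true]; exact ⟨c, hc, by simp⟩
    have := congrArg (Nat.testBit · c.toNat) h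
    simp [Nat.testBit_or, hb] at this
    rw [pvMaskOf_testBit, List.any_eq_true] at this
    obtain ⟨a, ha, hak⟩ := this
    have hac : a = c := by
      have h1 : a.toNat = c.toNat := by simpa using hak
      exact Char.ext (UInt32.toNat_inj.mp h1)
    simp only [List.contains_iff_mem]
    exact hac ▸ ha
  · intro h
    apply Nat.eq_of_testBit_eq
    intro k
    simp only [Nat.testBit_or, pvMaskOf_testBit]
    by_cases hk : cs.any (fun c => c.toNat == k) = true
    · rw [List.any_eq_true] at hk
      obtain ⟨c, hc, hck⟩ := hk
      have hm : c ∈ allowed := by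
        have := h c hc; simpa [List.contains_iff_mem] using this
      have : allowed.any (fun a => a.toNat == k) = true := by
        rw [List.any_eq_true]; exact ⟨c, hm, hck⟩
      simp [this]
    · simp [Bool.eq_false_iff.mpr hk]

-- A's inner loop adds 1 exactly when some char of the word is outside allowed
theorem pvAWordLoop_eq (allowed : List Char) (cs : List Char) (count : Int) :
    pvAWordLoop allowed cs count =
      count + (if cs.all (fun c => allowed.contains c) then 0 else 1) := by
  induction cs generalizing count with
  | nil => simp [pvAWordLoop]
  | cons c rest ih =>
      by_cases h : c ∈ allowed <;> simp [pvAWordLoop, h, ih]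

theorem pvFoldA (allowed : List Char) (ws : List String) (acc : Int) :
    ws.foldl (fun acc w => pvAWordLoop allowed w.toList acc) acc
      = acc + (ws.countP (fun w => !(w.toList.all (fun c => allowed.contains c))) : Int) := by
  induction ws generalizing acc with
  | nil => simp
  | cons w rest ih =>
      rw [List.foldl_cons, ih, pvAWordLoop_eq, List.countP_cons]
      by_cases h : w.toList.all (fun c => allowed.contains c) = true
      · rw [if_pos h, if_neg (by simpa using h : ¬ ((!w.toList.all fun c => allowed.contains c) = true))]
        push_cast; ring
      · rw [if_neg h, if_pos (by simpa using h)]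
        push_cast; ring

theorem pvFoldB (allowed : List Char) (ws : List String) (acc : Int) :
    ws.foldl (fun total w =>
        if pvMaskOf w.toList ||| pvMaskOf allowed == pvMaskOf allowed then total + 1 else total) acc
      = acc + (ws.countP (fun w => w.toList.all (fun c => allowed.contains c)) : Int) := by
  induction ws generalizing acc with
  | nil => simp
  | cons w rest ih =>
      rw [List.foldl_cons, ih, pvMask_subset_eq, List.countP_cons]
      by_cases h : w.toList.all (fun c => allowed.contains c) = true
      · rw [if_pos h, if_pos h]; push_cast; ring
      · rw [if_neg h, if_neg h]; push_cast; ring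

-- ===== VERDICT (by name: the statement is the Claim_ definition above) =====
theorem countConsistentStrings_spec : Claim_equal_countConsistentStrings := by
  intro allowed words _
  unfold Spec_countConsistentStrings countConsistentStrings countConsistentStrings_alt
  simp only [pvFoldA, pvFoldB]
  have h := List.length_eq_countP_add_countP
    (fun w => w.toList.all (fun c => allowed.toList.contains c)) (l := words)
  simp only [decide_not, Bool.decide_eq_true] at h
  have h2 : (words.length : Int)
      = (words.countP (fun w => w.toList.all (fun c => allowed.toList.contains c)) : Int)
        + (words.countP (fun w => !(w.toList.all (fun c => allowed.toList.contains c))) : Int) := by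
    rw [h]; push_cast; ring
  omega
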